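-- pv_equiv track=rewrite | github.com/markr9/WhAos-Stat | whaos_stat.py | fail1s
-- ===== SOURCE A (Python) =====
-- def fail1s(values,effects):
--     i=len(values)-1
--     while i>=0:
--         if values[i]==1:
--             values.pop(i)
--             effects.pop(i)
--         i-=1
--     return values,effects
-- ===== SOURCE B (Python) =====
-- def fail1s(values, effects):
--     drop = {i for i, v in enumerate(values) if v == 1}
--     values[:] = [v for v in values if v != 1]
--     effects[:] = [e for i, e in enumerate(effects) if i not in drop]
--     return values, effects
-- ===== Notes on version B (the rewrite author's own statement) =====
-- stated objective: alternative
-- what changed: B computes the set of indices holding value 1 in one pass and then rebuilds each list with a single index-filtering pass (slice-assigned back into the same objects), instead of A's backward while-loop doing repeated list.pop(i) on both lists; Pre_ excludes only inputs where A raises IndexError (effects too short for a pop).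
import Mathlib
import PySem

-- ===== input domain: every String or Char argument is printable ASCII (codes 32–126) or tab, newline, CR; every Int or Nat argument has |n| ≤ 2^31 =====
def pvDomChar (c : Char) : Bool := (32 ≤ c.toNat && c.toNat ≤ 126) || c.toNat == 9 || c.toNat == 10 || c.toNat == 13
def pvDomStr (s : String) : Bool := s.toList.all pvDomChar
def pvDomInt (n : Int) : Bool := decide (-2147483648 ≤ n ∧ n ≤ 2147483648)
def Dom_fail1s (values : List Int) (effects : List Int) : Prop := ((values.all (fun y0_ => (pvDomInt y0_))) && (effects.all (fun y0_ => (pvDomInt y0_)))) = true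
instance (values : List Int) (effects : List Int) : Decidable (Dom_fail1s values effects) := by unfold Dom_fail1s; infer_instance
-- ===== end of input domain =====

-- B collects the index set where values==1 in one pass, then filters each list by index in a
-- single pass each, instead of A's backward while-loop of repeated list.pop(i); both Pythons
-- mutate the argument lists in place and return those same objects (A via pop, B via slice
-- assignment) — the equivalence proved here is about the RETURN value.

-- ===== PORT A =====
-- A's while-loop, i from len(values)-1 down to 0; counter k = i+1.
-- Python raises IndexError when effects.pop(i) is out of range (pop? = none); those inputs are
-- excluded by Pre_ below, and the wrapper returns a default there (never reached under Pre_).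
def fail1sLoopA (k : Nat) (vs es : List Int) : Option (List Int × List Int) :=
  match k with
  | 0 => some (vs, es)
  | k + 1 =>
    match PySem.List.pyGet? vs (k : Int) with
    | none => none
    | some v =>
      if v = 1 then
        match PySem.List.pop? vs (k : Int), PySem.List.pop? es (k : Int) with
        | some (_, vs'), some (_, es') => fail1sLoopA k vs' es'
        | _, _ => none
      else fail1sLoopA k vs es

def fail1s (values : List Int) (effects : List Int) : List Int × List Int :=
  (fail1sLoopA values.length values effects).getD ([], [])

-- ===== PORT B =====
def fail1s_alt (values : List Int) (effects : List Int) : List Int × List Int :=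
  let drop : PySem.Set Int :=
    PySem.Set.ofList (((PySem.List.enumerate values).filter (fun p => p.2 == 1)).map Prod.fst)
  (values.filter (fun v => v ≠ 1),
   ((PySem.List.enumerate effects).filter (fun p => !(PySem.Set.contains drop p.1))).map Prod.snd)

-- ===== PRECONDITION & SPEC =====
-- Pre_ excludes exactly the inputs on which A raises IndexError: effects.pop(i) with the current
-- effects list too short (only possible when effects starts out shorter than values).
def Pre_fail1s (values : List Int) (effects : List Int) : Prop :=
  ∀ k < values.length, values.getD k 0 = 1 →
    k + ((values.drop (k + 1)).count 1) < effects.length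
instance (values : List Int) (effects : List Int) : Decidable (Pre_fail1s values effects) := by
  unfold Pre_fail1s; infer_instance
def pvWitness_fail1s : List Int × List Int := ([1, 2, 1, 3], [10, 20, 30, 40])

def Spec_fail1s (values : List Int) (effects : List Int) (out : List Int × List Int) : Prop := out = fail1s_alt values effects
instance (values : List Int) (effects : List Int) (out : List Int × List Int) : Decidable (Spec_fail1s values effects out) := by unfold Spec_fail1s; infer_instance

-- ===== CLAIM (what is proved, stated in full; the proofs are below) =====
def Claim_equal_fail1s : Prop := ∀ (values : List Int) (effects : List Int), Dom_fail1s values effects → Pre_fail1s values effects → Spec_fail1s values effects (fail1s values effects)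

-- ===== LEMMAS AND PROOFS =====

-- ---- A-side: the backward popping loop computes filter + zip-filter ++ tail ----
theorem pvTakeEraseIdx (l : List Int) (k : Nat) : (l.eraseIdx k).take k = l.take k := by
  rw [List.eraseIdx_eq_take_drop_succ, List.take_append]
  simp [List.take_take, List.length_take]
  omega

theorem pvDropEraseIdx (l : List Int) (k : Nat) (hk : k < l.length) :
    (l.eraseIdx k).drop k = l.drop (k+1) := by
  rw [List.eraseIdx_eq_take_drop_succ, List.drop_append]
  simp [List.length_take, Nat.le_of_lt hk, Nat.min_eq_left (Nat.le_of_lt hk)]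

theorem pvGetDEraseIdx (l : List Int) (k i : Nat) (hik : i < k) :
    (l.eraseIdx k).getD i 0 = l.getD i 0 := by
  rw [List.getD_eq_getElem?_getD, List.getD_eq_getElem?_getD, List.getElem?_eraseIdx_of_lt hik]

theorem pvSegEraseIdx (l : List Int) (k i : Nat) (hik : i < k) (hk : k < l.length) :
    ((l.eraseIdx k).drop (i+1)).take (k-(i+1)) = (l.drop (i+1)).take (k-(i+1)) := by
  rw [List.eraseIdx_eq_take_drop_succ, List.drop_append, List.take_append]
  have h1 : ((l.take k).drop (i+1)).length = k - (i+1) := by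
    simp [List.length_take, List.length_drop]; omega
  simp [h1, List.drop_take, List.take_take]
  omega

theorem pvTakeZip (l₁ l₂ : List Int) (j : Nat) : (l₁.take j).zip l₂ = (l₁.zip l₂).take j := by
  induction l₁ generalizing l₂ j with
  | nil => simp
  | cons a t ih =>
    cases j with
    | zero => simp
    | succ j => cases l₂ with
      | nil => simp
      | cons b t₂ => simp [ih t₂ j]

-- zip only sees the first |l₁| of l₂
theorem pvZipTakeRight (l₁ l₂ : List Int) (j : Nat) (h : l₁.length ≤ j) :
    l₁.zip (l₂.take j) = l₁.zip l₂ := by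
  induction l₁ generalizing l₂ j with
  | nil => simp
  | cons a t ih =>
    cases l₂ with
    | nil => simp
    | cons b t₂ =>
      cases j with
      | zero => simp at h
      | succ j => simp at h; simp [ih t₂ j h]

-- split off the element at index k
theorem pvZipSnoc (vs es : List Int) (k : Nat) (hkv : k < vs.length) (hke : k < es.length) :
    (vs.take (k+1)).zip es = (vs.take k).zip es ++ [(vs[k], es[k])] := by
  have h2 : (vs.take k).length = k := by simp [List.length_take]; omega
  have h3 : (es.take k).length = k := by simp [List.length_take]; omega
  rw [List.take_succ, List.getElem?_eq_getElem hkv]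
  conv_lhs => rw [← List.take_append_drop k es]
  rw [List.zip_append (by rw [h2, h3])]
  rw [pvZipTakeRight _ _ k (le_of_eq h2), List.drop_eq_getElem_cons hke]
  rfl

theorem pvCountSeg (vs : List Int) (i k : Nat) (hik : i < k) (hk : k < vs.length) :
    ((vs.drop (i+1)).take (k - i)).count 1
      = ((vs.drop (i+1)).take (k - (i+1))).count 1 + (if vs[k] = 1 then 1 else 0) := by
  have h : k - i = (k - (i+1)) + 1 := by omega
  have hidx : i + 1 + (k - (i+1)) = k := by omega
  have hg : (vs.drop (i+1))[k-(i+1)]? = some vs[k] := by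
    rw [List.getElem?_drop, hidx, List.getElem?_eq_getElem hk]
  rw [h, List.take_succ, hg]
  by_cases hv : vs[k] = 1 <;> simp [List.count_append, hv]

theorem loop_eq (k : Nat) : ∀ (vs es : List Int), k ≤ vs.length →
    (∀ i < k, vs.getD i 0 = 1 →
      i + (((vs.drop (i + 1)).take (k - (i + 1))).count 1) < es.length) →
    fail1sLoopA k vs es =
      some ((vs.take k).filter (fun v => v ≠ 1) ++ vs.drop k,
            (((vs.take k).zip es).filter (fun p => p.1 ≠ 1)).map Prod.snd ++ es.drop k) := by
  induction k with
  | zero => intro vs es _ _; simp [fail1sLoopA]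
  | succ k ih =>
    intro vs es hk hpre
    have hkv : k < vs.length := hk
    have hget : PySem.List.pyGet? vs (k : Int) = some vs[k] := by
      simp [List.getElem?_eq_getElem hkv]
    by_cases h1 : vs[k] = 1
    · have hgd : vs.getD k 0 = 1 := by rw [List.getD_eq_getElem vs 0 hkv]; exact h1
      have hke : k < es.length := by
        have := hpre k (Nat.lt_succ_self k) hgd
        simpa using this
      have hpopv := PySem.List.pop?_natCast vs k hkv
      have hpope := PySem.List.pop?_natCast es k hke
      rw [fail1sLoopA, hget]
      simp only [if_pos h1, hpopv, hpope]
      have hlen : k ≤ (vs.eraseIdx k).length := by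
        rw [List.length_eraseIdx_of_lt hkv]; omega
      have hpre' : ∀ i < k, (vs.eraseIdx k).getD i 0 = 1 →
          i + ((((vs.eraseIdx k).drop (i + 1)).take (k - (i + 1))).count 1) < (es.eraseIdx k).length := by
        intro i hik hgdi
        rw [pvGetDEraseIdx _ _ _ hik] at hgdi
        rw [pvSegEraseIdx _ _ _ hik hkv, List.length_eraseIdx_of_lt hke]
        have hbig := hpre i (by omega) hgdi
        have hseg := pvCountSeg vs i k hik hkv
        rw [if_pos h1] at hseg
        have he : k + 1 - (i+1) = k - i := by omega
        rw [he] at hbig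
        omega
      rw [ih _ _ hlen hpre']
      refine congrArg some (congrArg₂ Prod.mk ?_ ?_)
      · -- values component
        rw [pvTakeEraseIdx, pvDropEraseIdx _ _ hkv]
        rw [List.take_succ, List.getElem?_eq_getElem hkv, Option.toList_some, h1]
        rw [List.filter_append,
            show List.filter (fun v => decide (v ≠ 1)) [(1 : Int)] = [] from by simp,
            List.append_nil]
      · -- effects component
        have hz : (vs.take k).zip (es.eraseIdx k) = (vs.take k).zip es := by
          rw [← pvZipTakeRight (vs.take k) (es.eraseIdx k) k (by simp), pvTakeEraseIdx,
              pvZipTakeRight (vs.take k) es k (by simp)]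
        rw [pvTakeEraseIdx, pvDropEraseIdx _ _ hke, hz]
        rw [pvZipSnoc vs es k hkv hke, h1]
        rw [List.filter_append,
            show List.filter (fun p : Int × Int => decide (p.1 ≠ 1)) [((1 : Int), es[k])] = [] from by simp,
            List.append_nil]
    · rw [fail1sLoopA, hget]
      simp only [if_neg h1]
      have hpre' : ∀ i < k, vs.getD i 0 = 1 →
          i + (((vs.drop (i + 1)).take (k - (i + 1))).count 1) < es.length := by
        intro i hik hgdi
        have hbig := hpre i (by omega) hgdi
        have hseg := pvCountSeg vs i k hik hkv
        rw [if_neg h1] at hseg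
        have he : k + 1 - (i+1) = k - i := by omega
        rw [he] at hbig
        omega
      rw [ih _ _ (by omega) hpre']
      refine congrArg some (congrArg₂ Prod.mk ?_ ?_)
      · rw [List.take_succ, List.getElem?_eq_getElem hkv, Option.toList_some]
        rw [List.drop_eq_getElem_cons hkv]
        rw [List.filter_append, List.append_assoc,
            show List.filter (fun v => decide (v ≠ 1)) [vs[k]] = [vs[k]] from by simp [h1],
            List.singleton_append]
      · by_cases hke : k < es.length
        · rw [pvZipSnoc vs es k hkv hke]
          rw [List.drop_eq_getElem_cons hke]
          rw [List.filter_append,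
              show List.filter (fun p : Int × Int => decide (p.1 ≠ 1)) [(vs[k], es[k])] = [(vs[k], es[k])] from by simp [h1],
              List.map_append, List.append_assoc]
          rfl
        · have h1e : es.drop k = [] := List.drop_eq_nil_of_le (by omega)
          have h2e : es.drop (k+1) = [] := List.drop_eq_nil_of_le (by omega)
          have hzz : (vs.take (k+1)).zip es = (vs.take k).zip es := by
            rw [pvTakeZip, pvTakeZip]
            rw [List.take_of_length_le, List.take_of_length_le] <;>
              simp [List.length_zip] <;> omega
          rw [h1e, h2e, hzz]

-- ---- B-side: the index-set filter computes the same normal form ----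

-- membership in B's drop set, as a closed boolean on the index
theorem pvDropContains (values : List Int) (i : Int) (h0 : 0 ≤ i) :
    (PySem.Set.ofList (((PySem.List.enumerate values).filter (fun p => p.2 == 1)).map Prod.fst)).contains i
      = (decide (i < (values.length : Int)) && (values.getD i.toNat 0 == 1)) := by
  rcases Int.eq_ofNat_of_zero_le h0 with ⟨n, rfl⟩
  by_cases hmem : (n : Int) ∈ (((PySem.List.enumerate values).filter (fun p => p.2 == 1)).map Prod.fst)
  · have hc : (PySem.Set.ofList (((PySem.List.enumerate values).filter (fun p => p.2 == 1)).map Prod.fst)).contains (n : Int) = true := by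
      rw [PySem.Set.contains_iff, PySem.Set.mem_ofList]; exact hmem
    rw [hc]
    simp only [List.mem_map, List.mem_filter] at hmem
    obtain ⟨p, ⟨hp, hp1⟩, hpf⟩ := hmem
    rw [PySem.List.mem_enumerate_iff] at hp
    obtain ⟨j, hj, rfl⟩ := hp
    simp only [beq_iff_eq] at hp1
    simp only [Int.zero_add] at hpf
    have hjn : j = n := by exact_mod_cast hpf
    subst hjn
    simp only [Int.toNat_natCast]
    rw [List.getD_eq_getElem values 0 hj]
    simp [hp1, hj]
  · have hc : (PySem.Set.ofList (((PySem.List.enumerate values).filter (fun p => p.2 == 1)).map Prod.fst)).contains (n : Int) = false := by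
      rw [Bool.eq_false_iff]
      intro hcc
      exact hmem ((PySem.Set.mem_ofList _ _).mp ((PySem.Set.contains_iff _ _).mp hcc))
    rw [hc]
    simp only [Int.toNat_natCast]
    by_cases hn : n < values.length
    · have hv : values[n] ≠ 1 := by
        intro hv1
        exact hmem (by
          simp only [List.mem_map, List.mem_filter]
          exact ⟨((n : Int), values[n]), ⟨by
            rw [PySem.List.mem_enumerate_iff]
            exact ⟨n, hn, by simp⟩, by simp [hv1]⟩, rfl⟩)
      rw [List.getD_eq_getElem values 0 hn]
      simp [hv, hn]
    · rw [List.getD_eq_getElem?_getD, List.getElem?_eq_none (by omega : values.length ≤ n)]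
      simp

-- the effects pass, generalized over the running index k
theorem pvEffPass (values : List Int) : ∀ (es : List Int) (k : Nat),
    ((PySem.List.enumerate es (k : Int)).filter
        (fun p => !(decide (p.1 < (values.length : Int)) && (values.getD p.1.toNat 0 == 1)))).map Prod.snd
      = (((values.drop k).zip es).filter (fun p => p.1 ≠ 1)).map Prod.snd
          ++ es.drop (values.length - k) := by
  intro es
  induction es with
  | nil => intro k; simp [PySem.List.enumerate_nil]
  | cons e es ih =>
    intro k
    rw [PySem.List.enumerate_cons]
    have hcast : ((k : Int) + 1) = ((k + 1 : Nat) : Int) := by push_cast; ring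
    by_cases hk : k < values.length
    · have hdrop : values.drop k = values[k] :: values.drop (k + 1) :=
        List.drop_eq_getElem_cons hk
      have hgd : values.getD ((k : Int)).toNat 0 = values[k] := by
        rw [Int.toNat_natCast, List.getD_eq_getElem values 0 hk]
      have hsub : values.length - k = (values.length - (k + 1)) + 1 := by omega
      by_cases h1 : values[k] = 1
      · have hcond : (!(decide ((k : Int) < (values.length : Int)) && (values.getD ((k : Int)).toNat 0 == 1))) = false := by
          rw [hgd]; simp [h1, hk]
        rw [List.filter_cons_of_neg (by simpa using hcond)]
        rw [hcast, ih (k + 1), hdrop, hsub]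
        simp [h1]
      · have hcond : (!(decide ((k : Int) < (values.length : Int)) && (values.getD ((k : Int)).toNat 0 == 1))) = true := by
          rw [hgd]; simp [h1]
        rw [List.filter_cons_of_pos (by simpa using hcond)]
        rw [List.map_cons, hcast, ih (k + 1), hsub]
        rw [hdrop, List.zip_cons_cons,
            List.filter_cons_of_pos (by simp [h1]), List.map_cons]
        simp
    · have hdrop : values.drop k = [] := List.drop_eq_nil_of_le (by omega)
      have hdrop' : values.drop (k + 1) = [] := List.drop_eq_nil_of_le (by omega)
      have hgd : values.getD ((k : Int)).toNat 0 = 0 := by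
        rw [Int.toNat_natCast, List.getD_eq_getElem?_getD,
            List.getElem?_eq_none (by omega : values.length ≤ k)]
        rfl
      have hcond : (!(decide ((k : Int) < (values.length : Int)) && (values.getD ((k : Int)).toNat 0 == 1))) = true := by
        rw [hgd]; simp
      rw [List.filter_cons_of_pos (by simpa using hcond)]
      rw [List.map_cons, hcast, ih (k + 1), hdrop, hdrop']
      have h0 : values.length - k = 0 := by omega
      have h0' : values.length - (k + 1) = 0 := by omega
      simp [h0, h0']

-- fail1s_alt equals the shared normal form
theorem pvAltEq (values effects : List Int) :
    fail1s_alt values effects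
      = ((values.filter (fun v => v ≠ 1) : List Int),
         ((((values.zip effects).filter (fun p => p.1 ≠ 1)).map Prod.snd) ++ effects.drop values.length : List Int)) := by
  unfold fail1s_alt
  refine congrArg₂ Prod.mk rfl ?_
  have hcong : (PySem.List.enumerate effects).filter
      (fun p => !((PySem.Set.ofList (((PySem.List.enumerate values).filter (fun p => p.2 == 1)).map Prod.fst)).contains p.1))
      = (PySem.List.enumerate effects).filter
      (fun p => !(decide (p.1 < (values.length : Int)) && (values.getD p.1.toNat 0 == 1))) := by
    apply List.filter_congr
    intro p hp
    rw [PySem.List.mem_enumerate_iff] at hp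
    obtain ⟨j, hj, rfl⟩ := hp
    rw [pvDropContains values _ (by omega)]
  rw [hcong]
  have := pvEffPass values effects 0
  simpa using this

-- ===== VERDICT (by name: the statement is the Claim_ definition above) =====
theorem fail1s_spec : Claim_equal_fail1s := by
  intro values effects _ hpre
  unfold Spec_fail1s fail1s
  rw [loop_eq values.length values effects le_rfl ?_, pvAltEq]
  · simp
  · intro i hi hgd
    have hfull : ((values.drop (i + 1)).take (values.length - (i + 1))).count 1
        = ((values.drop (i + 1))).count 1 := by
      rw [List.take_of_length_le (by simp)]
    rw [hfull]
    exact hpre i hi hgd
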